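-- pv_equiv track=rewrite | github.com/twopercent/advent2015 | day5.py | restricted_strings
-- ===== SOURCE A (Python) =====
-- def restricted_strings(test_word):
--     result = False
--     restricted_list = ['ab','cd','pq','xy']
--
--     for restricted in restricted_list:
--         if restricted in test_word:
--             result = True
--             break
--     return result
-- ===== SOURCE B (Python) =====
-- def restricted_strings(test_word):
--     forbidden = {'ab', 'cd', 'pq', 'xy'}
--     return any(a + b in forbidden for a, b in zip(test_word, test_word[1:]))
-- ===== Notes on version B (the rewrite author's own statement) =====
-- stated objective: alternative
-- what changed: Instead of searching the whole word once per forbidden substring, B makes one left-to-right pass over adjacent character pairs and tests each bigram against a set of forbidden pairs.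
import Mathlib
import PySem

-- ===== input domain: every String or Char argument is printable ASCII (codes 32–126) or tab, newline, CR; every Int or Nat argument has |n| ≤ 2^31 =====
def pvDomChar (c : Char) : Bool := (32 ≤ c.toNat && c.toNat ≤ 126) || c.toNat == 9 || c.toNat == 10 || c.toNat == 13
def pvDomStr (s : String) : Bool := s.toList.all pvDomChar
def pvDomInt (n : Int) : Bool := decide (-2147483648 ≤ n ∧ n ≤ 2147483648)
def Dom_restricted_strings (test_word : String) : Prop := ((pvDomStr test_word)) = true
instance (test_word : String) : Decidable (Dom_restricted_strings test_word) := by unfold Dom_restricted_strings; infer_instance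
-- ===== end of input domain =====

-- B replaces the per-forbidden-substring search by one pass over adjacent bigrams tested against a set (alternative decomposition).


-- ===== PORT A =====
-- A's loop over the restricted list with early break: structural recursion over the list.
def goA : List String → String → Bool
  | [], _ => false
  | r :: rest, tw => if PySem.Str.isIn r tw then true else goA rest tw

def restricted_strings (test_word : String) : Bool :=
  goA ["ab", "cd", "pq", "xy"] test_word

-- ===== PORT B =====
-- B's single pass over adjacent character pairs (zip(test_word, test_word[1:])); a+b on chars = String.ofList [a,b] (exact).
def restricted_strings_alt (test_word : String) : Bool :=
  let forbidden : PySem.Set String := PySem.Set.ofList ["ab", "cd", "pq", "xy"]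
  (test_word.toList.zip (test_word.toList.drop 1)).any
    (fun p => PySem.Set.contains forbidden (String.ofList [p.1, p.2]))

-- ===== PRECONDITION & SPEC =====
def Spec_restricted_strings (test_word : String) (out : Bool) : Prop := out = restricted_strings_alt test_word
instance (test_word : String) (out : Bool) : Decidable (Spec_restricted_strings test_word out) := by unfold Spec_restricted_strings; infer_instance

-- ===== CLAIM (what is proved, stated in full; the proofs are below) =====
def Claim_equal_restricted_strings : Prop := ∀ (test_word : String), Dom_restricted_strings test_word → Spec_restricted_strings test_word (restricted_strings test_word)

-- ===== LEMMAS AND PROOFS =====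

theorem isIn_eq_decide (sub s : List Char) : PySem.Chars.isIn sub s = decide (sub <:+: s) := by
  by_cases h : sub <:+: s
  · simp [h, (PySem.Chars.isIn_iff_infix sub s).mpr h]
  · simp [h, (PySem.Chars.isIn_eq_false_iff sub s).mpr h]

theorem bigram_not_infix_singleton (x y c : Char) : ¬ [x, y] <:+: [c] := by
  intro h
  have := h.length_le
  simp at this

theorem bigram_infix_cons (x y c1 c2 : Char) (rest : List Char) :
    ([x, y] <:+: c1 :: c2 :: rest) ↔ (c1 = x ∧ c2 = y) ∨ [x, y] <:+: c2 :: rest := by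
  constructor
  · intro h
    rcases List.infix_cons_iff.mp h with h | h
    · rcases List.cons_prefix_cons.mp h with ⟨rfl, h2⟩
      rcases List.cons_prefix_cons.mp h2 with ⟨rfl, _⟩
      exact Or.inl ⟨rfl, rfl⟩
    · exact Or.inr h
  · rintro (⟨rfl, rfl⟩ | h)
    · exact List.infix_cons_iff.mpr (Or.inl (by simp))
    · exact List.infix_cons_iff.mpr (Or.inr h)

theorem altB (cs : List Char) :
    ((cs.zip (cs.drop 1)).any
      (fun p => PySem.Set.contains (PySem.Set.ofList ["ab", "cd", "pq", "xy"]) (String.ofList [p.1, p.2]))) =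
    (decide (['a','b'] <:+: cs) || decide (['c','d'] <:+: cs) ||
     decide (['p','q'] <:+: cs) || decide (['x','y'] <:+: cs)) := by
  induction cs with
  | nil => simp
  | cons c1 tail ih =>
    cases tail with
    | nil => simp [bigram_not_infix_singleton]
    | cons c2 rest =>
      simp only [List.drop_succ_cons, List.drop_zero, List.zip_cons_cons, List.any_cons] at ih ⊢
      rw [ih]
      simp only [bigram_infix_cons]
      have : PySem.Set.contains (PySem.Set.ofList ["ab", "cd", "pq", "xy"]) (String.ofList [c1, c2]) =
          (decide (c1 = 'a' ∧ c2 = 'b') || decide (c1 = 'c' ∧ c2 = 'd') ||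
           decide (c1 = 'p' ∧ c2 = 'q') || decide (c1 = 'x' ∧ c2 = 'y')) := by
        simp [PySem.Set.ofList, PySem.Set.add, PySem.Set.contains, String.ext_iff,
          String.toList_ofList, Bool.or_assoc]
      rw [this]
      by_cases h1 : c1 = 'a' ∧ c2 = 'b' <;> by_cases h2 : c1 = 'c' ∧ c2 = 'd' <;>
        by_cases h3 : c1 = 'p' ∧ c2 = 'q' <;> by_cases h4 : c1 = 'x' ∧ c2 = 'y' <;>
        simp [h1, h2, h3, h4]

-- ===== VERDICT (by name: the statement is the Claim_ definition above) =====
theorem restricted_strings_spec : Claim_equal_restricted_strings := by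
  intro tw _
  unfold Spec_restricted_strings restricted_strings restricted_strings_alt
  rw [altB]
  have hab : ("ab" : String).toList = ['a', 'b'] := by decide
  have hcd : ("cd" : String).toList = ['c', 'd'] := by decide
  have hpq : ("pq" : String).toList = ['p', 'q'] := by decide
  have hxy : ("xy" : String).toList = ['x', 'y'] := by decide
  simp only [goA, PySem.Str.isIn_eq, isIn_eq_decide, hab, hcd, hpq, hxy]
  by_cases h1 : ['a', 'b'] <:+: tw.toList <;>
    by_cases h2 : ['c', 'd'] <:+: tw.toList <;>
    by_cases h3 : ['p', 'q'] <:+: tw.toList <;>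
    by_cases h4 : ['x', 'y'] <:+: tw.toList <;>
    simp [h1, h2, h3, h4]
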